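-- pv_equiv track=rewrite | github.com/eliottcassidy2000/math | 04-computation/p11_beta8_v5.py | canon_aut_rep
-- ===== SOURCE A (Python) =====
-- def apply_aut(path, a, b, n):
--     """Apply affine map x -> a*x + b mod n."""
--     return tuple((a * v + b) % n for v in path)
--
-- def canon_aut_rep(path, n, QR):
--     """Return canonical orbit representative under full Aut(P_p)."""
--     best = tuple(path)
--     for a in QR:
--         for b in range(n):
--             img = apply_aut(path, a, b, n)
--             if img < best:
--                 best = img
--     return best
-- ===== SOURCE B (Python) =====
-- def canon_aut_rep(path, n, QR):
--     """Return canonical orbit representative under full Aut(P_p).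
--
--     For each multiplier a, the lexicographically smallest image over all
--     shifts b is the unique one whose first element is 0, i.e.
--     b = (-a*path[0]) % n, so the inner loop over range(n) is unnecessary.
--     """
--     best = tuple(path)
--     if n > 0 and path:
--         for a in QR:
--             b = (-a * path[0]) % n
--             img = tuple((a * v + b) % n for v in path)
--             if img < best:
--                 best = img
--     return best
-- ===== Notes on version B (the rewrite author's own statement) =====
-- stated objective: faster
-- what changed: Instead of trying every shift b in range(n), B computes for each multiplier a the unique shift b = (-a*path[0]) % n that makes the first element 0 (the only candidate that can be lexicographically minimal for that a), removing the inner loop over n.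
import Mathlib
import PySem

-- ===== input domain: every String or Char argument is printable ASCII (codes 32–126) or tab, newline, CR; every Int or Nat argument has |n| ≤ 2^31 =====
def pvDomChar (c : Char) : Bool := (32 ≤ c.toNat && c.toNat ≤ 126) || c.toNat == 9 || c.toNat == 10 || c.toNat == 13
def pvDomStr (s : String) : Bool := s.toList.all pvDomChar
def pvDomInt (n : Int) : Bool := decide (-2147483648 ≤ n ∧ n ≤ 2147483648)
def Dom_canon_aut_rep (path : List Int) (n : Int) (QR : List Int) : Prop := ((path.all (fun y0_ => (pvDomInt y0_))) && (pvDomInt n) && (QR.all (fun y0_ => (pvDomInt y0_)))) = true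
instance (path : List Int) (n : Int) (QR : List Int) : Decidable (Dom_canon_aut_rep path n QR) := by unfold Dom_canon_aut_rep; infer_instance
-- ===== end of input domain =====

-- B drops A's inner loop over range(n): per multiplier a, the unique shift b = (-a*path[0]) % n
-- is the only candidate that can be lexicographically minimal (objective: faster).

-- Python's `<` on tuples of ints (lexicographic, proper prefix is smaller); used by both ports.
def pyTupLt : List Int → List Int → Bool
  | [], [] => false
  | [], _ :: _ => true
  | _ :: _, [] => false
  | a :: as, b :: bs => if a < b then true else if b < a then false else pyTupLt as bs

-- ===== PORT A =====
def apply_aut (path : List Int) (a b n : Int) : List Int :=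
  path.map (fun v => PySem.Int.mod (a * v + b) n)

def canon_aut_rep (path : List Int) (n : Int) (QR : List Int) : List Int :=
  QR.foldl (fun best a =>
    (PySem.List.pyRange 0 n 1).foldl (fun best b =>
      let img := apply_aut path a b n
      if pyTupLt img best then img else best) best) path

-- ===== PORT B =====
def canon_aut_rep_alt (path : List Int) (n : Int) (QR : List Int) : List Int :=
  if 0 < n ∧ path ≠ [] then
    QR.foldl (fun best a =>
      let b := PySem.Int.mod (-a * path.headI) n
      let img := path.map (fun v => PySem.Int.mod (a * v + b) n)
      if pyTupLt img best then img else best) path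
  else path

-- ===== PRECONDITION & SPEC =====
def Spec_canon_aut_rep (path : List Int) (n : Int) (QR : List Int) (out : List Int) : Prop := out = canon_aut_rep_alt path n QR
instance (path : List Int) (n : Int) (QR : List Int) (out : List Int) : Decidable (Spec_canon_aut_rep path n QR out) := by unfold Spec_canon_aut_rep; infer_instance

-- ===== CLAIM (what is proved, stated in full; the proofs are below) =====
def Claim_equal_canon_aut_rep : Prop := ∀ (path : List Int) (n : Int) (QR : List Int), Dom_canon_aut_rep path n QR → Spec_canon_aut_rep path n QR (canon_aut_rep path n QR)

-- ===== LEMMAS AND PROOFS =====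

theorem pyTupLt_irrefl (x : List Int) : pyTupLt x x = false := by
  induction x with
  | nil => rfl
  | cons h t ih => simp [pyTupLt, ih]

theorem pyTupLt_trans {x y z : List Int} (h1 : pyTupLt x y = true) (h2 : pyTupLt y z = true) :
    pyTupLt x z = true := by
  induction x generalizing y z with
  | nil =>
    cases y with
    | nil => simp [pyTupLt] at h1
    | cons b bs =>
      cases z with
      | nil => simp [pyTupLt] at h2
      | cons c cs => simp [pyTupLt]
  | cons a as ih =>
    cases y with
    | nil => simp [pyTupLt] at h1
    | cons b bs =>
      cases z with
      | nil => simp [pyTupLt] at h2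
      | cons c cs =>
        simp only [pyTupLt] at h1 h2 ⊢
        by_cases g1 : a < b
        · by_cases g2 : b < c
          · rw [if_pos (show a < c by omega)]
          · rw [if_neg g2] at h2
            by_cases g3 : c < b
            · rw [if_pos g3] at h2; exact absurd h2 (by simp)
            · rw [if_neg g3] at h2
              rw [if_pos (show a < c by omega)]
        · rw [if_neg g1] at h1
          by_cases g2 : b < a
          · rw [if_pos g2] at h1; exact absurd h1 (by simp)
          · rw [if_neg g2] at h1
            have hab : a = b := by omega
            subst hab
            by_cases g3 : a < c
            · rw [if_pos g3]
            · rw [if_neg g3] at h2 ⊢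
              by_cases g4 : c < a
              · rw [if_pos g4] at h2; exact absurd h2 (by simp)
              · rw [if_neg g4] at h2 ⊢
                exact ih h1 h2

theorem pyTupLt_total {x y : List Int} (h1 : pyTupLt x y = false) (h2 : pyTupLt y x = false) :
    x = y := by
  induction x generalizing y with
  | nil =>
    cases y with
    | nil => rfl
    | cons b bs => simp [pyTupLt] at h1
  | cons a as ih =>
    cases y with
    | nil => simp [pyTupLt] at h2
    | cons b bs =>
      simp only [pyTupLt] at h1 h2
      by_cases g1 : a < b
      · rw [if_pos g1] at h1; exact absurd h1 (by simp)
      · by_cases g2 : b < a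
        · rw [if_pos g2] at h2; exact absurd h2 (by simp)
        · rw [if_neg g1, if_neg g2] at h1
          rw [if_neg g2, if_neg g1] at h2
          have hab : a = b := by omega
          rw [hab, ih h1 h2]

-- the fold step keeps an accumulator no candidate can beat
theorem foldl_step_id {α : Type} (l : List α) (g : α → List Int) (c : List Int)
    (h : ∀ b ∈ l, pyTupLt (g b) c = false) :
    l.foldl (fun best b => if pyTupLt (g b) best then g b else best) c = c := by
  induction l with
  | nil => rfl
  | cons b l ih =>
    have hb := h b (List.mem_cons_self ..)
    simp only [List.foldl_cons, hb, Bool.false_eq_true, if_false]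
    exact ih (fun x hx => h x (List.mem_cons_of_mem _ hx))

-- a keep-the-smaller fold over a list containing a minimum m computes min c m
theorem foldl_step_min {α : Type} (l : List α) (g : α → List Int) (m : List Int)
    (hmin : ∀ b ∈ l, pyTupLt (g b) m = false) (hmem : ∃ b ∈ l, g b = m) (c : List Int) :
    l.foldl (fun best b => if pyTupLt (g b) best then g b else best) c
      = if pyTupLt m c then m else c := by
  induction l generalizing c with
  | nil => exact absurd hmem (by simp)
  | cons b l ih =>
    have hb : pyTupLt (g b) m = false := hmin b (List.mem_cons_self ..)
    simp only [List.foldl_cons]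
    by_cases hrest : ∃ b' ∈ l, g b' = m
    · rw [ih (fun x hx => hmin x (List.mem_cons_of_mem _ hx)) hrest]
      by_cases hgc : pyTupLt (g b) c = true
      · rw [if_pos hgc]
        cases hm : pyTupLt m (g b) with
        | true =>
          have hmc : pyTupLt m c = true := pyTupLt_trans hm hgc
          simp [hmc]
        | false =>
          have hgm : g b = m := pyTupLt_total hb hm
          rw [hgm] at hgc ⊢
          simp [hgc]
      · rw [if_neg hgc]
    · have hgb : g b = m := by
        rcases hmem with ⟨b', hb', he⟩
        rcases List.mem_cons.1 hb' with rfl | hmem'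
        · exact he
        · exact absurd ⟨b', hmem', he⟩ hrest
      rw [hgb]
      refine foldl_step_id _ _ _ (fun x hx => ?_)
      have hx' : pyTupLt (g x) m = false := hmin x (List.mem_cons_of_mem _ hx)
      by_cases hmc : pyTupLt m c = true
      · rw [if_pos hmc]; exact hx'
      · rw [if_neg hmc]
        cases hxc : pyTupLt (g x) c with
        | false => rfl
        | true =>
          exfalso
          cases hmx : pyTupLt m (g x) with
          | true => exact hmc (pyTupLt_trans hmx hxc)
          | false =>
            have : g x = m := pyTupLt_total hx' hmx
            rw [this] at hxc; exact hmc hxc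

-- head of B's candidate is 0
theorem head_cand_zero (a v n : Int) (hn : 0 < n) :
    PySem.Int.mod (a * v + PySem.Int.mod (-a * v) n) n = 0 := by
  rw [PySem.Int.mod_eq_emod_of_pos hn, PySem.Int.mod_eq_emod_of_pos hn]
  rw [Int.add_emod, Int.emod_emod_of_dvd _ dvd_rfl, ← Int.add_emod]
  simp

-- a shift whose image starts with 0 is B's shift
theorem shift_unique (a v n b : Int) (hn : 0 < n) (hb0 : 0 ≤ b) (hbn : b < n)
    (h : PySem.Int.mod (a * v + b) n = 0) : b = PySem.Int.mod (-a * v) n := by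
  rw [PySem.Int.mod_eq_emod_of_pos hn] at h ⊢
  have : (-a * v) % n = (-a * v + (a * v + b)) % n := by
    rw [Int.add_emod, h, add_zero, Int.emod_emod_of_dvd _ dvd_rfl]
  rw [this, show -a * v + (a * v + b) = b by ring, Int.emod_eq_of_lt hb0 hbn]

-- for n > 0 and a nonempty path, A's inner fold over range(n) equals B's single-candidate step
theorem inner_fold_eq (v : Int) (t : List Int) (n a : Int) (hn : 0 < n) (best : List Int) :
    (PySem.List.pyRange 0 n 1).foldl (fun best b =>
        if pyTupLt (apply_aut (v :: t) a b n) best then apply_aut (v :: t) a b n else best) best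
      = (if pyTupLt ((v :: t).map (fun x => PySem.Int.mod (a * x + PySem.Int.mod (-a * v) n) n)) best
         then (v :: t).map (fun x => PySem.Int.mod (a * x + PySem.Int.mod (-a * v) n) n) else best) := by
  set b0 := PySem.Int.mod (-a * v) n with hb0def
  set m := (v :: t).map (fun x => PySem.Int.mod (a * x + b0) n) with hmdef
  have hmin : ∀ b ∈ PySem.List.pyRange 0 n 1, pyTupLt (apply_aut (v :: t) a b n) m = false := by
    intro b hb
    rw [PySem.List.mem_pyRange_one] at hb
    have hnn : 0 ≤ PySem.Int.mod (a * v + b) n := PySem.Int.mod_nonneg _ hn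
    have hm0 : PySem.Int.mod (a * v + b0) n = 0 := head_cand_zero a v n hn
    simp only [apply_aut, hmdef, List.map_cons, pyTupLt, hm0]
    split_ifs with g1 g2
    · omega
    · rfl
    · have hb0' : PySem.Int.mod (a * v + b) n = 0 := by omega
      have : b = b0 := shift_unique a v n b hn hb.1 hb.2 hb0'
      subst this
      exact pyTupLt_irrefl _
  have hmem : ∃ b ∈ PySem.List.pyRange 0 n 1, apply_aut (v :: t) a b n = m := by
    refine ⟨b0, ?_, rfl⟩
    rw [PySem.List.mem_pyRange_one]
    exact ⟨PySem.Int.mod_nonneg _ hn, PySem.Int.mod_lt _ hn⟩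
  exact foldl_step_min (PySem.List.pyRange 0 n 1) (fun b => apply_aut (v :: t) a b n) m hmin hmem best

-- n ≤ 0: range(n) is empty, A never changes best
theorem canon_A_nonpos (path : List Int) (n : Int) (QR : List Int) (hn : n ≤ 0) :
    canon_aut_rep path n QR = path := by
  unfold canon_aut_rep
  rw [PySem.List.pyRange_one_eq_nil hn]
  simp only [List.foldl_nil]
  exact List.foldl_fixed _

-- path = []: every image is [] and [] < [] is false, best stays []
theorem canon_A_empty (n : Int) (QR : List Int) : canon_aut_rep [] n QR = [] := by
  unfold canon_aut_rep
  refine List.foldl_fixed' (fun a => ?_) QR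
  exact List.foldl_fixed' (fun b => rfl) _

-- ===== VERDICT (by name: the statement is the Claim_ definition above) =====
theorem canon_aut_rep_spec : Claim_equal_canon_aut_rep := by
  intro path n QR _
  unfold Spec_canon_aut_rep canon_aut_rep_alt
  by_cases hg : 0 < n ∧ path ≠ []
  · rw [if_pos hg]
    obtain ⟨hn, hne⟩ := hg
    obtain ⟨v, t, rfl⟩ := List.exists_cons_of_ne_nil hne
    unfold canon_aut_rep
    refine List.foldl_ext _ _ _ (fun best a _ => ?_)
    simpa using inner_fold_eq v t n a hn best
  · rw [if_neg hg]
    rcases not_and_or.1 hg with hn | hne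
    · exact canon_A_nonpos path n QR (by omega)
    · rw [not_not.1 hne]
      exact canon_A_empty n QR
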